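-- pv_equiv track=rewrite | github.com/jneeven/Weather-Forecasting-Data | process_data.py | websites_per_location
-- ===== SOURCE A (Python) =====
-- def websites_per_location(data, locations, dates):
-- 	# Keep track of which websites a location appears on
-- 	locations_websites = {}
-- 	for location in locations:
-- 		locations_websites[location] = []
--
-- 	for date in dates:
-- 		for location in locations:
-- 			for entry in data:
-- 				if entry[-1] == date and entry[1] == location:
-- 					locations_websites[location].append(entry[0])
--
-- 	return locations_websites
-- ===== SOURCE B (Python) =====
-- def websites_per_location(data, locations, dates):
-- 	# Index the websites by (date, location) in a single pass over the data,
-- 	# then assemble each location's list by lookup instead of rescanning data.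
-- 	pairs = [((entry[-1], entry[1]), entry[0]) for entry in data if len(entry) >= 2]
-- 	index = {}
-- 	for key, website in pairs:
-- 		index.setdefault(key, []).append(website)
--
-- 	result = {location: [] for location in locations}
-- 	for date in dates:
-- 		for location in locations:
-- 			result[location].extend(index.get((date, location), []))
-- 	return result
-- ===== Notes on version B (the rewrite author's own statement) =====
-- stated objective: alternative
-- what changed: B builds a (date, location) -> websites index over the data once and assembles each location's list by dictionary lookup, instead of A's rescan of the whole data list for every (date, location) pair.
-- crash fix: A raises IndexError when dates and locations are nonempty and some data entry is empty or has length 1 with its only element among the dates; B skips such short entries and returns the dict of matches among the well-formed entries. — e.g. on websites_per_location([[]], ["locX"], ["d1"]): A raises IndexError, B returns [("locX", [])]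
import Mathlib
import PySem

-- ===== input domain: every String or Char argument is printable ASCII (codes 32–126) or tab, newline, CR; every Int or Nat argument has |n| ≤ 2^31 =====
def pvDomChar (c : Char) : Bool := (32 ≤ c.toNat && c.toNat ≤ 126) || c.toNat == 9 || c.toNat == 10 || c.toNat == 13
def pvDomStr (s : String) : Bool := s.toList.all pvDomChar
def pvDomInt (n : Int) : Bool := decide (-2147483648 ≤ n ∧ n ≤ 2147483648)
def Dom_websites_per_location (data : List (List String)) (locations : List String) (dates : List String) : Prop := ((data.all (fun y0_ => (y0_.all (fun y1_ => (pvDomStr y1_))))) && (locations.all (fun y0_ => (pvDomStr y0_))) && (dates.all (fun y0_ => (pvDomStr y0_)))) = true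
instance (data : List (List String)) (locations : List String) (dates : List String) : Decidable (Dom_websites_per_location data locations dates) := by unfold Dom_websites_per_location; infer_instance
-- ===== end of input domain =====

-- B replaces A's per-(date,location) rescan of the data by a (date,location)->websites
-- index built in one pass over the data (objective: alternative algorithm).


-- ===== PORT A =====
def websites_per_location (data : List (List String)) (locations : List String) (dates : List String) : List (String × List String) :=
  let init : PySem.Dict String (List String) :=
    locations.foldl (fun d location => d.insert location []) PySem.Dict.empty
  let final : PySem.Dict String (List String) :=
    dates.foldl (fun d date =>
      locations.foldl (fun d location =>
        data.foldl (fun d entry =>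
          if PySem.List.pyGetD entry (-1) "" == date && PySem.List.pyGetD entry 1 "" == location then
            d.modify location [] (fun l => l ++ [PySem.List.pyGetD entry 0 ""])
          else d) d) d) init
  final.items

-- ===== PORT B =====
def websites_per_location_alt (data : List (List String)) (locations : List String) (dates : List String) : List (String × List String) :=
  let pairs : List ((String × String) × String) :=
    (data.filter (fun entry => 2 ≤ entry.length)).map
      (fun entry => ((PySem.List.pyGetD entry (-1) "", PySem.List.pyGetD entry 1 ""),
                     PySem.List.pyGetD entry 0 ""))
  let index : PySem.Dict (String × String) (List String) :=
    pairs.foldl (fun d p => d.modify p.1 [] (fun l => l ++ [p.2])) PySem.Dict.empty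
  let result : PySem.Dict String (List String) :=
    locations.foldl (fun d location => d.insert location []) PySem.Dict.empty
  let final : PySem.Dict String (List String) :=
    dates.foldl (fun d date =>
      locations.foldl (fun d location =>
        d.modify location [] (fun l => l ++ index.getD (date, location) [])) d) result
  final.items

-- ===== PRECONDITION & SPEC =====
-- Pre_ excludes exactly the inputs on which A raises IndexError: dates and locations
-- nonempty while some data entry is empty, or has length 1 with its element among the dates.
def Pre_websites_per_location (data : List (List String)) (locations : List String) (dates : List String) : Prop :=
  dates = [] ∨ locations = [] ∨ ∀ e ∈ data, e ≠ [] ∧ (e.length = 1 → e.headI ∉ dates)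
instance (data : List (List String)) (locations : List String) (dates : List String) : Decidable (Pre_websites_per_location data locations dates) := by unfold Pre_websites_per_location; infer_instance

def pvWitness_websites_per_location : List (List String) × List String × List String :=
  ([["siteA", "locX", "d1"], ["siteB", "locX", "d2"]], ["locX", "locY"], ["d1", "d2"])

-- A raises IndexError when dates and locations are nonempty and some data entry is empty
-- or has length 1 with its only element among the dates; B skips such short entries and
-- returns the dict of matches among the well-formed entries.
def Raises_websites_per_location (data : List (List String)) (locations : List String) (dates : List String) : Prop :=
  dates ≠ [] ∧ locations ≠ [] ∧ ∃ e ∈ data, e = [] ∨ (e.length = 1 ∧ e.headI ∈ dates)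
instance (data : List (List String)) (locations : List String) (dates : List String) : Decidable (Raises_websites_per_location data locations dates) := by unfold Raises_websites_per_location; infer_instance
def pvRaiseWitness_websites_per_location : List (List String) × List String × List String :=
  ([[]], ["locX"], ["d1"])
def pvRaiseWitnessOut_websites_per_location : List (String × List String) := [("locX", [])]

def Spec_websites_per_location (data : List (List String)) (locations : List String) (dates : List String) (out : List (String × List String)) : Prop := out = websites_per_location_alt data locations dates
instance (data : List (List String)) (locations : List String) (dates : List String) (out : List (String × List String)) : Decidable (Spec_websites_per_location data locations dates out) := by unfold Spec_websites_per_location; infer_instance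

-- ===== CLAIM (what is proved, stated in full; the proofs are below) =====
def Claim_equal_websites_per_location : Prop := ∀ (data : List (List String)) (locations : List String) (dates : List String), Dom_websites_per_location data locations dates → Pre_websites_per_location data locations dates → Spec_websites_per_location data locations dates (websites_per_location data locations dates)

def Claim_raises_websites_per_location : Prop := (∀ (data : List (List String)) (locations : List String) (dates : List String), Dom_websites_per_location data locations dates → Raises_websites_per_location data locations dates → ¬ Pre_websites_per_location data locations dates) ∧ (Dom_websites_per_location (pvRaiseWitness_websites_per_location.1) (pvRaiseWitness_websites_per_location.2.1) (pvRaiseWitness_websites_per_location.2.2) ∧ Raises_websites_per_location (pvRaiseWitness_websites_per_location.1) (pvRaiseWitness_websites_per_location.2.1) (pvRaiseWitness_websites_per_location.2.2) ∧ websites_per_location_alt (pvRaiseWitness_websites_per_location.1) (pvRaiseWitness_websites_per_location.2.1) (pvRaiseWitness_websites_per_location.2.2) = pvRaiseWitnessOut_websites_per_location)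

-- ===== LEMMAS AND PROOFS =====

-- A's per-(date,location) matched websites, in data order.
def pvMatched (data : List (List String)) (date location : String) : List String :=
  (data.filter (fun e => PySem.List.pyGetD e (-1) "" == date && PySem.List.pyGetD e 1 "" == location)).map
    (fun e => PySem.List.pyGetD e 0 "")

theorem pvMatched_nil (date location : String) : pvMatched [] date location = [] := rfl

-- A's inner data-loop: effect on keys and on every lookup.
theorem pvInnerA (date location : String) (data : List (List String)) :
    ∀ (d : PySem.Dict String (List String)), d.contains location = true →
      (data.foldl (fun d entry =>
          if PySem.List.pyGetD entry (-1) "" == date && PySem.List.pyGetD entry 1 "" == location then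
            d.modify location [] (fun l => l ++ [PySem.List.pyGetD entry 0 ""])
          else d) d).keys = d.keys ∧
      ∀ k, (data.foldl (fun d entry =>
          if PySem.List.pyGetD entry (-1) "" == date && PySem.List.pyGetD entry 1 "" == location then
            d.modify location [] (fun l => l ++ [PySem.List.pyGetD entry 0 ""])
          else d) d).getD k [] =
        if k = location then d.getD location [] ++ pvMatched data date location else d.getD k [] := by
  induction data with
  | nil =>
    intro d _
    refine ⟨rfl, fun k => ?_⟩
    by_cases h : k = location <;> simp [h, pvMatched_nil]
  | cons e rest ih =>
    intro d hc
    simp only [List.foldl_cons]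
    by_cases he : (PySem.List.pyGetD e (-1) "" == date && PySem.List.pyGetD e 1 "" == location) = true
    · rw [if_pos he]
      have hc' : (d.modify location [] (fun l => l ++ [PySem.List.pyGetD e 0 ""])).contains location = true := by
        simp [PySem.Dict.contains_modify]
      obtain ⟨hk, hg⟩ := ih _ hc'
      refine ⟨?_, fun k => ?_⟩
      · rw [hk, PySem.Dict.keys_modify, PySem.Dict.keys_insert_of_contains _ _ hc]
      · rw [hg k]
        have hm : pvMatched (e :: rest) date location =
            PySem.List.pyGetD e 0 "" :: pvMatched rest date location := by
          simp [pvMatched, he]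
        by_cases hkl : k = location
        · subst hkl
          rw [if_pos rfl, if_pos rfl, PySem.Dict.getD_modify_self, hm]
          simp
        · rw [if_neg hkl, if_neg hkl, PySem.Dict.getD_modify, if_neg hkl]
    · rw [if_neg he]
      obtain ⟨hk, hg⟩ := ih _ hc
      refine ⟨hk, fun k => ?_⟩
      rw [hg k]
      have hm : pvMatched (e :: rest) date location = pvMatched rest date location := by
        simp [pvMatched, Bool.eq_false_iff.mpr he]
      rw [hm]

-- B's index: lookup at (date, location) for date ∈ dates equals A's matched list,
-- given the Pre_ entry condition.
theorem pvEntryCond (dates : List String) (e : List String)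
    (hne : e ≠ []) (h1 : e.length = 1 → e.headI ∉ dates)
    (date : String) (hd : date ∈ dates) (location : String) :
    (((PySem.List.pyGetD e (-1) "", PySem.List.pyGetD e 1 "") == (date, location))
        && decide (2 ≤ e.length))
    = (PySem.List.pyGetD e (-1) "" == date && PySem.List.pyGetD e 1 "" == location) := by
  by_cases hlast : PySem.List.pyGetD e (-1) "" = date
  · by_cases hloc : PySem.List.pyGetD e 1 "" = location
    · have h2 : 2 ≤ e.length := by
        have h0 : e.length ≠ 0 := fun h => hne (List.length_eq_zero_iff.mp h)
        have h1' : e.length ≠ 1 := by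
          intro hl1
          obtain ⟨a, ha⟩ := List.length_eq_one_iff.mp hl1
          apply h1 hl1
          subst ha
          have : PySem.List.pyGetD [a] (-1) "" = a := by
            rw [PySem.List.pyGetD_neg_one [a] "" (by simp)]
            simp
          rw [List.headI, ← this, hlast]
          exact hd
        omega
      simp [hlast, hloc, h2]
    · simp [beq_eq_decide, Prod.mk.injEq, hloc]
  · simp [beq_eq_decide, Prod.mk.injEq, hlast]

-- B's index: lookup at (date, location) for date ∈ dates equals A's matched list,
-- given the Pre_ entry condition.
theorem pvIndex_getD (data : List (List String)) (dates : List String)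
    (hpre : ∀ e ∈ data, e ≠ [] ∧ (e.length = 1 → e.headI ∉ dates))
    (date : String) (hd : date ∈ dates) (location : String) :
    (((data.filter (fun entry => 2 ≤ entry.length)).map
        (fun entry => ((PySem.List.pyGetD entry (-1) "", PySem.List.pyGetD entry 1 ""),
                       PySem.List.pyGetD entry 0 ""))).foldl
      (fun d p => d.modify p.1 [] (fun l => l ++ [p.2])) PySem.Dict.empty).getD (date, location) []
    = pvMatched data date location := by
  rw [PySem.Dict.getD_foldl_modify_append, PySem.Dict.getD_empty]
  simp only [List.nil_append, List.filter_map, List.map_map, List.filter_filter, pvMatched]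
  congr 1
  apply List.filter_congr
  intro e hemem
  obtain ⟨hne, h1⟩ := hpre e hemem
  simpa using pvEntryCond dates e hne h1 date hd location

-- the locations-loop, run in parallel on both sides.
theorem pvLocLoop (data : List (List String)) (index : PySem.Dict (String × String) (List String))
    (date : String) (locations : List String)
    (hidx : ∀ location ∈ locations, index.getD (date, location) [] = pvMatched data date location) :
    ∀ (dA dB : PySem.Dict String (List String)), dA.keys = dB.keys →
      (∀ k, dA.getD k [] = dB.getD k []) →
      (∀ l ∈ locations, dA.contains l = true) →
      (locations.foldl (fun d location =>
          data.foldl (fun d entry =>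
            if PySem.List.pyGetD entry (-1) "" == date && PySem.List.pyGetD entry 1 "" == location then
              d.modify location [] (fun l => l ++ [PySem.List.pyGetD entry 0 ""])
            else d) d) dA).keys = dA.keys ∧
      (locations.foldl (fun d location =>
          d.modify location [] (fun l => l ++ index.getD (date, location) [])) dB).keys = dB.keys ∧
      ∀ k, (locations.foldl (fun d location =>
          data.foldl (fun d entry =>
            if PySem.List.pyGetD entry (-1) "" == date && PySem.List.pyGetD entry 1 "" == location then
              d.modify location [] (fun l => l ++ [PySem.List.pyGetD entry 0 ""])
            else d) d) dA).getD k []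
        = (locations.foldl (fun d location =>
            d.modify location [] (fun l => l ++ index.getD (date, location) [])) dB).getD k [] := by
  induction locations with
  | nil => intro dA dB hkeys hg _; exact ⟨rfl, rfl, hg⟩
  | cons loc rest ih =>
    intro dA dB hkeys hg hcont
    simp only [List.foldl_cons]
    have hcA : dA.contains loc = true := hcont loc (List.mem_cons_self)
    have hcB : dB.contains loc = true := by
      rw [PySem.Dict.contains_iff_mem_keys, ← hkeys, ← PySem.Dict.contains_iff_mem_keys]
      exact hcA
    obtain ⟨hkA, hgA⟩ := pvInnerA date loc data dA hcA
    have hkB : (dB.modify loc [] (fun l => l ++ index.getD (date, loc) [])).keys = dB.keys := by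
      rw [PySem.Dict.keys_modify, PySem.Dict.keys_insert_of_contains _ _ hcB]
    have hgB : ∀ k, (dB.modify loc [] (fun l => l ++ index.getD (date, loc) [])).getD k []
        = if k = loc then dB.getD loc [] ++ index.getD (date, loc) [] else dB.getD k [] := by
      intro k
      rw [PySem.Dict.getD_modify]
    have hidx' : ∀ location ∈ rest, index.getD (date, location) [] = pvMatched data date location :=
      fun l hl => hidx l (List.mem_cons_of_mem _ hl)
    have hgeq : ∀ k, (data.foldl (fun d entry =>
        if PySem.List.pyGetD entry (-1) "" == date && PySem.List.pyGetD entry 1 "" == loc then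
          d.modify loc [] (fun l => l ++ [PySem.List.pyGetD entry 0 ""])
        else d) dA).getD k []
        = (dB.modify loc [] (fun l => l ++ index.getD (date, loc) [])).getD k [] := by
      intro k
      rw [hgA k, hgB k, hidx loc (List.mem_cons_self), hg k]
      by_cases hkl : k = loc
      · simp [hkl, hg loc]
      · simp [hkl]
    obtain ⟨h1, h2, h3⟩ := ih hidx' _ _ (by rw [hkA, hkB, hkeys]) hgeq
      (fun l hl => by
        rw [PySem.Dict.contains_iff_mem_keys, hkA, ← PySem.Dict.contains_iff_mem_keys]
        exact hcont l (List.mem_cons_of_mem _ hl))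
    exact ⟨by rw [h1, hkA], by rw [h2, hkB], h3⟩

-- the dates-loop, run in parallel on both sides.
theorem pvDateLoop (data : List (List String)) (index : PySem.Dict (String × String) (List String))
    (locations : List String) (dates : List String)
    (hidx : ∀ date ∈ dates, ∀ location ∈ locations,
        index.getD (date, location) [] = pvMatched data date location) :
    ∀ (dA dB : PySem.Dict String (List String)), dA.keys = dB.keys →
      (∀ k, dA.getD k [] = dB.getD k []) →
      (∀ l ∈ locations, dA.contains l = true) →
      (dates.foldl (fun d date =>
        locations.foldl (fun d location =>
          data.foldl (fun d entry =>
            if PySem.List.pyGetD entry (-1) "" == date && PySem.List.pyGetD entry 1 "" == location then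
              d.modify location [] (fun l => l ++ [PySem.List.pyGetD entry 0 ""])
            else d) d) d) dA).keys = dA.keys ∧
      (dates.foldl (fun d date =>
        locations.foldl (fun d location =>
          d.modify location [] (fun l => l ++ index.getD (date, location) [])) d) dB).keys = dB.keys ∧
      ∀ k, (dates.foldl (fun d date =>
        locations.foldl (fun d location =>
          data.foldl (fun d entry =>
            if PySem.List.pyGetD entry (-1) "" == date && PySem.List.pyGetD entry 1 "" == location then
              d.modify location [] (fun l => l ++ [PySem.List.pyGetD entry 0 ""])
            else d) d) d) dA).getD k []
        = (dates.foldl (fun d date =>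
            locations.foldl (fun d location =>
              d.modify location [] (fun l => l ++ index.getD (date, location) [])) d) dB).getD k [] := by
  induction dates with
  | nil => intro dA dB hkeys hg _; exact ⟨rfl, rfl, hg⟩
  | cons date rest ih =>
    intro dA dB hkeys hg hcont
    simp only [List.foldl_cons]
    obtain ⟨h1, h2, h3⟩ := pvLocLoop data index date locations
      (fun l hl => hidx date (List.mem_cons_self) l hl) dA dB hkeys hg hcont
    obtain ⟨h4, h5, h6⟩ := ih (fun d hd l hl => hidx d (List.mem_cons_of_mem _ hd) l hl)
      _ _ (by rw [h1, h2, hkeys]) h3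
      (fun l hl => by
        rw [PySem.Dict.contains_iff_mem_keys, h1, ← PySem.Dict.contains_iff_mem_keys]
        exact hcont l hl)
    exact ⟨by rw [h4, h1], by rw [h5, h2], h6⟩

-- every location is a key of the initial dict.
theorem pvInitContains (locations : List String) :
    ∀ (d : PySem.Dict String (List String)) (l : String), (l ∈ locations ∨ d.contains l = true) →
      (locations.foldl (fun d location => d.insert location []) d).contains l = true := by
  induction locations with
  | nil =>
    intro d l h
    simp only [List.foldl_nil]
    rcases h with h | h
    · exact absurd h (List.not_mem_nil)
    · exact h
  | cons a rest ih =>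
    intro d l h
    simp only [List.foldl_cons]
    apply ih
    rcases h with h | h
    · rcases List.mem_cons.mp h with h | h
      · right; subst h; exact PySem.Dict.contains_insert_self _ _ _
      · left; exact h
    · right
      rw [PySem.Dict.contains_insert]
      simp [h]

theorem pvMain : ∀ (data : List (List String)) (locations : List String) (dates : List String),
    Pre_websites_per_location data locations dates →
    websites_per_location data locations dates = websites_per_location_alt data locations dates := by
  intro data locations dates hpre
  simp only [websites_per_location, websites_per_location_alt]
  set index : PySem.Dict (String × String) (List String) :=
    ((data.filter (fun entry => 2 ≤ entry.length)).map
        (fun entry => ((PySem.List.pyGetD entry (-1) "", PySem.List.pyGetD entry 1 ""),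
                       PySem.List.pyGetD entry 0 ""))).foldl
      (fun d p => d.modify p.1 [] (fun l => l ++ [p.2])) PySem.Dict.empty with hindex
  set init : PySem.Dict String (List String) :=
    locations.foldl (fun d location => d.insert location []) PySem.Dict.empty with hinit
  have hidx : ∀ date ∈ dates, ∀ location ∈ locations,
      index.getD (date, location) [] = pvMatched data date location := by
    intro date hd location hl
    rcases hpre with h | h | h
    · subst h; cases hd
    · subst h; cases hl
    · exact pvIndex_getD data dates h date hd location
  have hcont : ∀ l ∈ locations, init.contains l = true := by
    intro l hl
    exact pvInitContains locations PySem.Dict.empty l (Or.inl hl)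
  obtain ⟨hkeysA, hkeysB, hg⟩ := pvDateLoop data index locations dates hidx init init rfl (fun _ => rfl) hcont
  have hnodup : init.keys.Nodup := by
    apply PySem.Dict.nodup_keys_foldl_insert
    exact PySem.Dict.nodup_keys_empty
  rw [PySem.Dict.items_eq_map_keys _ (by rw [hkeysA]; exact hnodup) ([] : List String),
      PySem.Dict.items_eq_map_keys _ (by rw [hkeysB]; exact hnodup) ([] : List String),
      hkeysA, hkeysB]
  exact List.map_congr_left (fun k _ => by rw [hg k])

-- ===== VERDICT (by name: the statement is the Claim_ definition above) =====
theorem websites_per_location_spec : Claim_equal_websites_per_location := by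
  intro data locations dates _ hpre
  unfold Spec_websites_per_location
  exact pvMain data locations dates hpre

@[simp]
theorem websites_per_location_raises : Claim_raises_websites_per_location := by
  unfold Claim_raises_websites_per_location
  constructor
  · intro data locations dates _ hr
    unfold Raises_websites_per_location at hr
    obtain ⟨hd, hl, e, hmem, hbad⟩ := hr
    rintro (h | h | h)
    · exact hd h
    · exact hl h
    · obtain ⟨hne, h1⟩ := h e hmem
      rcases hbad with h' | ⟨h2, h3⟩
      · exact hne h'
      · exact h1 h2 h3
  · exact ⟨by decide, by decide, by decide⟩
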